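-- pv_equiv track=rewrite | github.com/i960107/algorithm | leetcode/371.SumOfTwoIntegers.py | solution
-- ===== SOURCE A (Python) =====
-- def solution(a: int, b: int) -> int:
--     MASK = 0xFFFFFFFF
--     INT_MAX = 0x7FFFFFFF
--
--     a_bin = bin(a & MASK)[2:].zfill(32)
--     b_bin = bin(b & MASK)[2:].zfill(32)
--
--     result = []
--     carry = 0
--     sum = 0
--     for i in range(32):
--         A = int(a_bin[31 - i])
--         B = int(b_bin[31 - i])
--
--         Q1 = A & B
--         Q2 = A ^ B
--         Q3 = Q2 & carry
--         sum = carry ^ Q2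
--         carry = Q1 | Q3
--
--         result.append(str(sum))
--     if carry == 1:
--         result.append("1")
--     result = int(''.join(result[::-1]),2) & MASK
--
--     if result > INT_MAX:
--         result = ~(result ^ MASK)
--
--     return result
-- ===== SOURCE B (Python) =====
-- def solution(a: int, b: int) -> int:
--     r = (a + b) % (1 << 32)
--     return r - (1 << 32) if r > (1 << 31) - 1 else r
-- ===== Notes on version B (the rewrite author's own statement) =====
-- stated objective: simpler
-- what changed: Replaced the 32-character binary-string construction and per-bit full-adder loop with a closed-form modular sum r = (a+b) % 2**32 followed by the same signed reinterpretation (r - 2**32 when r exceeds INT_MAX).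
import Mathlib
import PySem

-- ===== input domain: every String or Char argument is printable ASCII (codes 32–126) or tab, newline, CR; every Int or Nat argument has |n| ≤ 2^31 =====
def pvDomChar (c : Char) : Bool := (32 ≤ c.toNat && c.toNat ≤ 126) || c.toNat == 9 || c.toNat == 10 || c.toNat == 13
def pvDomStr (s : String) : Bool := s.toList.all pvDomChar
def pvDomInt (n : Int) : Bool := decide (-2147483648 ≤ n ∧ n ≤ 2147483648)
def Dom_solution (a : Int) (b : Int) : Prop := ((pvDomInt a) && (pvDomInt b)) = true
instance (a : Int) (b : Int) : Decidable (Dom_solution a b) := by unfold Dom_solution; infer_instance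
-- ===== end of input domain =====

-- B replaces A's 32-char binary-string full-adder loop by the closed form (a+b) mod 2^32
-- with the same signed reinterpretation; proved equal for all inputs in Dom.

-- ===== PORT A =====

-- int(c) for a '0'/'1' digit character
def pvDigit (c : Char) : Nat := c.toNat - 48

-- bin(n)[2:] for n ≥ 1 (MSB first); [] for 0
def pvBinAux : Nat → List Char
  | 0 => []
  | n+1 => pvBinAux ((n+1)/2) ++ [if (n+1) % 2 = 1 then '1' else '0']
  decreasing_by omega

-- bin(n)[2:]
def pvBin (n : Nat) : List Char := if n = 0 then ['0'] else pvBinAux n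

-- s.zfill(32)
def pvZfill32 (l : List Char) : List Char := List.replicate (32 - l.length) '0' ++ l

-- one iteration of A's full-adder loop; state = (result, carry, sum)
def pvAdderStep (aBin bBin : List Char) (st : List Char × Nat × Nat) (i : Int) : List Char × Nat × Nat :=
  let A := pvDigit ((PySem.List.pyGet? aBin (31 - i)).getD '0')
  let B := pvDigit ((PySem.List.pyGet? bBin (31 - i)).getD '0')
  let Q1 := A &&& B
  let Q2 := A ^^^ B
  let Q3 := Q2 &&& st.2.1
  let sum := st.2.1 ^^^ Q2
  let carry := Q1 ||| Q3
  (st.1 ++ [if sum = 1 then '1' else '0'], carry, sum)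

-- int(s, 2)
def pvParseBin (l : List Char) : Nat := l.foldl (fun acc c => 2 * acc + pvDigit c) 0

def solution (a : Int) (b : Int) : Int :=
  let MASK : Nat := 4294967295
  let INT_MAX : Nat := 2147483647
  let aBin := pvZfill32 (pvBin (PySem.Int.mod a 4294967296).toNat)
  let bBin := pvZfill32 (pvBin (PySem.Int.mod b 4294967296).toNat)
  let st := (PySem.List.pyRange 0 32 1).foldl (pvAdderStep aBin bBin) ([], 0, 0)
  let result := if st.2.1 = 1 then st.1 ++ ['1'] else st.1
  let r := pvParseBin result.reverse &&& MASK
  if r > INT_MAX then -((r ^^^ MASK : Nat) : Int) - 1 else (r : Int)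

-- ===== PORT B =====
def solution_alt (a : Int) (b : Int) : Int :=
  let r := PySem.Int.mod (a + b) 4294967296
  if r > 2147483647 then r - 4294967296 else r

-- ===== PRECONDITION & SPEC =====
def Spec_solution (a : Int) (b : Int) (out : Int) : Prop := out = solution_alt a b
instance (a : Int) (b : Int) (out : Int) : Decidable (Spec_solution a b out) := by unfold Spec_solution; infer_instance

-- ===== CLAIM (what is proved, stated in full; the proofs are below) =====
def Claim_equal_solution : Prop := ∀ (a : Int) (b : Int), Dom_solution a b → Spec_solution a b (solution a b)

-- ===== LEMMAS AND PROOFS =====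

-- LSB-first bit characters of x, n bits
def pvBitsLSB (x n : Nat) : List Char := (List.range n).map (fun i => if x.testBit i then '1' else '0')

-- value of an LSB-first bit-character list
def pvValLSB (l : List Char) : Nat := l.foldr (fun c acc => 2 * acc + pvDigit c) 0

lemma pvDigit_one : pvDigit '1' = 1 := rfl
lemma pvDigit_zero : pvDigit '0' = 0 := rfl

lemma pvBitsLSB_zero : ∀ m, pvBitsLSB 0 m = List.replicate m '0' := by
  intro m
  induction m with
  | zero => rfl
  | succ m ih =>
      have h : pvBitsLSB 0 (m+1) = pvBitsLSB 0 m ++ ['0'] := by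
        simp [pvBitsLSB, List.range_succ]
      rw [h, ih, List.replicate_succ']

lemma pvBitsLSB_succ (x k : Nat) :
    pvBitsLSB x (k+1) = (if x.testBit 0 then '1' else '0') :: pvBitsLSB (x/2) k := by
  simp only [pvBitsLSB, List.range_succ_eq_map, List.map_cons, List.map_map]
  congr 1
  apply List.map_congr_left
  intro i _
  simp [Function.comp, Nat.testBit_succ]

lemma pvPadAux : ∀ k, ∀ n, n < 2^k →
    List.replicate (k - (pvBinAux n).length) '0' ++ pvBinAux n = (pvBitsLSB n k).reverse := by
  intro k
  induction k with
  | zero =>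
      intro n hn
      interval_cases n
      simp [pvBinAux, pvBitsLSB]
  | succ k ih =>
      intro n hn
      match n with
      | 0 => simp [pvBinAux, pvBitsLSB_zero]
      | m+1 =>
          have hq : (m+1)/2 < 2^k := by
            have h2 : 2^(k+1) = 2*2^k := by ring
            omega
          have hih := ih ((m+1)/2) hq
          rw [pvBinAux, pvBitsLSB_succ, List.reverse_cons]
          have hbit : (if (m+1).testBit 0 then '1' else '0') = (if (m+1) % 2 = 1 then '1' else '0') := by
            simp [Nat.testBit_zero]
          have hlen : (k + 1 - (pvBinAux ((m+1)/2) ++ [if (m+1) % 2 = 1 then '1' else '0']).length)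
              = k - (pvBinAux ((m+1)/2)).length := by simp
          rw [hlen, ← List.append_assoc, hih, hbit]

lemma pvZfill_eq (x : Nat) (hx : x < 2^32) :
    pvZfill32 (pvBin x) = (pvBitsLSB x 32).reverse := by
  by_cases h0 : x = 0
  · subst h0
    rw [pvBitsLSB_zero]
    decide
  · have h := pvPadAux 32 x hx
    rw [pvBin, if_neg h0]
    simpa [pvZfill32] using h

lemma pvGetBit (x : Nat) (n : Nat) (hn : n < 32) :
    (PySem.List.pyGet? ((pvBitsLSB x 32).reverse) (31 - (n:Int))).getD '0'
      = if x.testBit n then '1' else '0' := by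
  have hidx : (31 - (n:Int)) = ((31 - n : Nat) : Int) := by omega
  rw [hidx, PySem.List.pyGet?_natCast]
  have hlt : 31 - n < ((pvBitsLSB x 32).reverse).length := by
    simp [pvBitsLSB]; omega
  rw [List.getElem?_eq_getElem hlt, Option.getD_some, List.getElem_reverse]
  simp only [pvBitsLSB, List.getElem_map, List.getElem_range, List.length_map, List.length_range]
  have h : 32 - 1 - (31 - n) = n := by omega
  rw [h]

lemma pvValLSB_foldr (l : List Char) (b : Nat) :
    l.foldr (fun c acc => 2 * acc + pvDigit c) b = pvValLSB l + b * 2 ^ l.length := by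
  induction l with
  | nil => simp [pvValLSB]
  | cons c l ih =>
      simp only [pvValLSB, List.foldr_cons, List.length_cons] at *
      rw [ih, pow_succ]
      ring

lemma pvValLSB_append (l : List Char) (c : Char) :
    pvValLSB (l ++ [c]) = pvValLSB l + pvDigit c * 2 ^ l.length := by
  have h : pvValLSB (l ++ [c]) = l.foldr (fun c acc => 2 * acc + pvDigit c) (pvDigit c) := by
    simp [pvValLSB]
  rw [h, pvValLSB_foldr]

lemma pvParse_reverse (l : List Char) : pvParseBin l.reverse = pvValLSB l := by
  simp [pvParseBin, List.foldl_reverse, pvValLSB]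

lemma pvModSucc (x n : Nat) : x % 2^(n+1) = x % 2^n + 2^n * (x / 2^n % 2) := by
  have h : (2:Nat)^(n+1) = 2^n * 2 := by ring
  rw [h, Nat.mod_mul]

lemma pvTestBitDiv (x n : Nat) : x / 2^n % 2 = (x.testBit n).toNat := by
  have h : x.testBit n = decide (x / 2^n % 2 = 1) := Nat.testBit_eq_decide_div_mod_eq
  have hlt : x / 2^n % 2 < 2 := Nat.mod_lt _ (by norm_num)
  rcases h2 : x.testBit n with _ | _ <;> rw [h2] at h
  · have h3 : ¬ (x / 2^n % 2 = 1) := by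
      intro hcon
      rw [hcon] at h
      simp at h
    simp only [Bool.toNat_false]
    omega
  · have h3 : x / 2^n % 2 = 1 := by
      by_contra hcon
      rw [decide_eq_false hcon] at h
      simp at h
    simp only [Bool.toNat_true]
    omega

lemma pvInv (x y : Nat) :
    ∀ n, n ≤ 32 →
    ((List.range n).foldl
      (fun st (k : Nat) => pvAdderStep ((pvBitsLSB x 32).reverse) ((pvBitsLSB y 32).reverse) st (0 + (k:Int)))
      ([], 0, 0)).1.length = n ∧
    ((List.range n).foldl
      (fun st (k : Nat) => pvAdderStep ((pvBitsLSB x 32).reverse) ((pvBitsLSB y 32).reverse) st (0 + (k:Int)))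
      ([], 0, 0)).2.1 ≤ 1 ∧
    pvValLSB ((List.range n).foldl
      (fun st (k : Nat) => pvAdderStep ((pvBitsLSB x 32).reverse) ((pvBitsLSB y 32).reverse) st (0 + (k:Int)))
      ([], 0, 0)).1 +
      ((List.range n).foldl
      (fun st (k : Nat) => pvAdderStep ((pvBitsLSB x 32).reverse) ((pvBitsLSB y 32).reverse) st (0 + (k:Int)))
      ([], 0, 0)).2.1 * 2^n = x % 2^n + y % 2^n := by
  intro n
  induction n with
  | zero =>
      intro _
      refine ⟨rfl, by simp, ?_⟩
      simp [pvValLSB, Nat.mod_one]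
  | succ n ih =>
      intro hn
      obtain ⟨hlen, hc, hval⟩ := ih (by omega)
      rw [List.range_succ, List.foldl_append, List.foldl_cons, List.foldl_nil]
      set prev := (List.range n).foldl
        (fun st (k : Nat) => pvAdderStep ((pvBitsLSB x 32).reverse) ((pvBitsLSB y 32).reverse) st (0 + (k:Int)))
        ([], 0, 0) with hprev
      have hA := pvGetBit x n (by omega)
      have hB := pvGetBit y n (by omega)
      have hxm := pvModSucc x n
      have hym := pvModSucc y n
      rw [pvTestBitDiv] at hxm
      rw [pvTestBitDiv] at hym
      have hp : (2:Nat)^(n+1) = 2*2^n := by ring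
      rcases Nat.le_one_iff_eq_zero_or_eq_one.mp hc with h0 | h0 <;>
        rcases hbx : x.testBit n with _ | _ <;> rcases hby : y.testBit n with _ | _ <;>
        rw [hbx] at hA hxm <;> rw [hby] at hB hym <;>
        simp only [Bool.toNat_false, Bool.toNat_true, if_true, if_false,
          Bool.false_eq_true] at hA hB hxm hym <;>
        simp [pvAdderStep, hA, hB, h0, pvDigit_one, pvDigit_zero, pvValLSB_append, hlen] <;>
        (rw [h0] at hval; omega)

lemma pvXorOnes : ∀ n, ∀ r, r < 2^n → r ^^^ (2^n - 1) = 2^n - 1 - r := by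
  intro n
  induction n with
  | zero => intro r h; interval_cases r; rfl
  | succ n ih =>
      intro r h
      have hp : (2:Nat)^(n+1) = 2 * 2^n := by ring
      have hq : r / 2 < 2^n := by omega
      have h1 : r = Nat.bit (decide (r % 2 = 1)) (r / 2) := by
        simp only [Nat.bit]
        rcases Nat.mod_two_eq_zero_or_one r with h2 | h2 <;> simp [h2] <;> omega
      have h2 : 2^(n+1) - 1 = Nat.bit true (2^n - 1) := by
        simp only [Nat.bit, cond_true]
        omega
      have hx : r ^^^ (2^(n+1) - 1)
          = Nat.bit (decide (r % 2 = 1) != true) (r / 2 ^^^ (2^n - 1)) := by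
        conv_lhs => rw [h1, h2]
        exact Nat.bitwise_bit rfl _ _ _ _
      rw [hx, ih (r/2) hq]
      simp only [Nat.bit]
      rcases Nat.mod_two_eq_zero_or_one r with h2 | h2 <;> simp [h2] <;> omega

lemma pvMain (a b : Int) : solution a b = solution_alt a b := by
  have hM : (0:Int) < 4294967296 := by norm_num
  simp only [solution, solution_alt]
  rw [PySem.Int.mod_eq_emod_of_pos hM, PySem.Int.mod_eq_emod_of_pos hM,
      PySem.Int.mod_eq_emod_of_pos hM]
  set x := (a % 4294967296).toNat with hxdef
  set y := (b % 4294967296).toNat with hydef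
  have hax : ((x : Int)) = a % 4294967296 := by
    rw [hxdef]; exact Int.toNat_of_nonneg (Int.emod_nonneg a (by norm_num))
  have hay : ((y : Int)) = b % 4294967296 := by
    rw [hydef]; exact Int.toNat_of_nonneg (Int.emod_nonneg b (by norm_num))
  have hx : x < 2^32 := by
    have h := Int.emod_lt_of_pos a hM; omega
  have hy : y < 2^32 := by
    have h := Int.emod_lt_of_pos b hM; omega
  rw [pvZfill_eq x hx, pvZfill_eq y hy]
  rw [PySem.List.pyRange_one]
  have h32 : ((32:Int) - 0).toNat = 32 := by decide
  rw [h32, List.foldl_map]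
  obtain ⟨hlen, hc, hval⟩ := pvInv x y 32 le_rfl
  set st := (List.range 32).foldl
    (fun st (k : Nat) => pvAdderStep ((pvBitsLSB x 32).reverse) ((pvBitsLSB y 32).reverse) st (0 + (k:Int)))
    ([], 0, 0) with hst
  have hx32 : x % 2^32 = x := Nat.mod_eq_of_lt hx
  have hy32 : y % 2^32 = y := Nat.mod_eq_of_lt hy
  rw [hx32, hy32] at hval
  have hv : pvParseBin (if st.2.1 = 1 then st.1 ++ ['1'] else st.1).reverse = x + y := by
    rcases Nat.le_one_iff_eq_zero_or_eq_one.mp hc with h0 | h0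
    · rw [h0, if_neg (by omega : ¬ (0 = 1)), pvParse_reverse]
      rw [h0] at hval
      omega
    · rw [h0, if_pos rfl, pvParse_reverse, pvValLSB_append, hlen, pvDigit_one]
      rw [h0] at hval
      omega
  rw [hv]
  have hand : (x + y) &&& 4294967295 = (x + y) % 2^32 := by
    have h := Nat.and_two_pow_sub_one_eq_mod (x + y) 32
    norm_num at h
    exact h
  rw [hand]
  set r := (x + y) % 2^32 with hr
  have hrlt : r < 2^32 := Nat.mod_lt _ (by norm_num)
  have hcast : ((r : Int)) = (a + b) % 4294967296 := by
    have h1 : ((r : Int)) = ((x + y : Nat) : Int) % 4294967296 := by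
      rw [hr, Int.natCast_mod]
      norm_num
    rw [h1]
    push_cast
    rw [hax, hay, ← Int.add_emod]
  by_cases hgt : r > 2147483647
  · rw [if_pos hgt, if_pos (by omega)]
    have hxo : r ^^^ 4294967295 = 4294967295 - r := by
      have h := pvXorOnes 32 r hrlt
      norm_num at h
      exact h
    rw [hxo]
    have hc2 : ((4294967295 - r : Nat) : Int) = 4294967295 - (r : Int) := by
      have : r ≤ 4294967295 := by omega
      push_cast [this]
      ring
    rw [hc2]
    omega
  · rw [if_neg hgt, if_neg (by omega)]
    omega

-- ===== VERDICT (by name: the statement is the Claim_ definition above) =====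
theorem solution_spec : Claim_equal_solution := by
  intro a b _
  unfold Spec_solution
  exact pvMain a b
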